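-- pv_equiv track=rewrite | github.com/MrBrantCode/unitest_baseline | mut_generate/mist_train_taco/taco_1694/solution.py | transform_array_after_k_turns
-- ===== SOURCE A (Python) =====
-- def transform_array_after_k_turns(N, K, A):
--     if K == 0:
--         return A
--
--     if K % 2 == 1:
--         MAX = max(A)
--         return [MAX - A[i] for i in range(N)]
--     else:
--         MIN = min(A)
--         return [-MIN + A[i] for i in range(N)]
-- ===== SOURCE B (Python) =====
-- def transform_array_after_k_turns(N, K, A):
--     if K == 0:
--         return A
--     result = A
--     for _ in range(1 if K % 2 == 1 else 2):
--         m = max(result)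
--         result = [m - x for x in result]
--     return result[:max(N, 0)]
-- ===== Notes on version B (the rewrite author's own statement) =====
-- stated objective: alternative
-- what changed: B replaces A's parity-based closed form (max-A[i] for odd K, A[i]-min for even K, built by an explicit index loop over range(N)) by directly simulating the turn operation result = [max(result)-x for x in result], applied once or twice according to K's period-2 behaviour, then returning the first max(N,0) entries; Pre_ excludes only the inputs on which A raises (empty A or N > len(A) with K != 0).
import Mathlib
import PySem

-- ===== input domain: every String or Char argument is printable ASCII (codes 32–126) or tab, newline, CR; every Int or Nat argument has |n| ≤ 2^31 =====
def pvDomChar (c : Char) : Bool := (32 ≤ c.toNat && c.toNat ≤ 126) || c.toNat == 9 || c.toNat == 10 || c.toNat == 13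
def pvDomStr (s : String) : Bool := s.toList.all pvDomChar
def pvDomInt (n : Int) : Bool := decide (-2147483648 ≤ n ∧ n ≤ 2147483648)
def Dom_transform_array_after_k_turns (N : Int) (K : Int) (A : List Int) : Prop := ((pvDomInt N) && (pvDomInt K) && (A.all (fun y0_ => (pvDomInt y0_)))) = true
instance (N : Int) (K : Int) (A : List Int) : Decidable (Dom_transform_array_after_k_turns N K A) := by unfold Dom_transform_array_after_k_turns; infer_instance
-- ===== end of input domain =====

-- B simulates the max-difference turn operation 1 or 2 times (period 2 in K) instead of A's parity closed form; alternative algorithm, same cost.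

-- ===== PORT A =====
def transform_array_after_k_turns (N : Int) (K : Int) (A : List Int) : List Int :=
  if K == 0 then A
  else if PySem.Int.mod K 2 == 1 then
    let MAX := (PySem.List.max? A (fun y => y)).getD 0   -- max(A); Pre_ excludes empty A here
    (PySem.List.pyRange 0 N 1).map (fun i => MAX - PySem.List.pyGetD A i 0)  -- A[i]; Pre_ keeps i in range
  else
    let MIN := (PySem.List.min? A (fun y => y)).getD 0
    (PySem.List.pyRange 0 N 1).map (fun i => -MIN + PySem.List.pyGetD A i 0)

-- ===== PORT B =====
-- one turn: result = [max(result) - x for x in result]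
def pvTurn (xs : List Int) : List Int :=
  let m := (PySem.List.max? xs (fun y => y)).getD 0
  xs.map (fun x => m - x)

def transform_array_after_k_turns_alt (N : Int) (K : Int) (A : List Int) : List Int :=
  if K == 0 then A
  else
    let turns : Nat := if PySem.Int.mod K 2 == 1 then 1 else 2
    PySem.List.slice ((List.range turns).foldl (fun result _ => pvTurn result) A) none (some (max N 0))  -- result[:max(N, 0)]

-- ===== PRECONDITION & SPEC =====
-- Pre_ excludes exactly the inputs on which A raises: with K ≠ 0, A raises ValueError on max/min
-- of an empty list and IndexError on A[i] when N > len(A).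
def Pre_transform_array_after_k_turns (N : Int) (K : Int) (A : List Int) : Prop :=
  K ≠ 0 → (A ≠ [] ∧ N ≤ (A.length : Int))
instance (N : Int) (K : Int) (A : List Int) : Decidable (Pre_transform_array_after_k_turns N K A) := by unfold Pre_transform_array_after_k_turns; infer_instance

def pvWitness_transform_array_after_k_turns : Int × Int × List Int := (2, 3, [1, 2])

def Spec_transform_array_after_k_turns (N : Int) (K : Int) (A : List Int) (out : List Int) : Prop := out = transform_array_after_k_turns_alt N K A
instance (N : Int) (K : Int) (A : List Int) (out : List Int) : Decidable (Spec_transform_array_after_k_turns N K A out) := by unfold Spec_transform_array_after_k_turns; infer_instance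

-- ===== CLAIM (what is proved, stated in full; the proofs are below) =====
def Claim_equal_transform_array_after_k_turns : Prop := ∀ (N : Int) (K : Int) (A : List Int), Dom_transform_array_after_k_turns N K A → Pre_transform_array_after_k_turns N K A → Spec_transform_array_after_k_turns N K A (transform_array_after_k_turns N K A)

-- ===== LEMMAS AND PROOFS =====

-- A's index comprehension over range(N), 0 ≤ N ≤ len(A), is a map over the first N elements of A
theorem pv_map_idx (f : Int → Int) (A : List Int) (N : Int) (h0 : 0 ≤ N) (hle : N ≤ (A.length : Int)) :
    (PySem.List.pyRange 0 N 1).map (fun i => f (PySem.List.pyGetD A i 0)) = (A.map f).take N.toNat := by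
  have hA' : (PySem.List.pyRange 0 N 1).map (fun i => PySem.List.pyGetD (A.take N.toNat) i 0)
      = A.take N.toNat := by
    have h := PySem.List.map_pyGetD_pyRange_zero' (A.take N.toNat) (0 : Int)
    rwa [List.length_take, show ((min N.toNat A.length : Nat) : Int) = N by omega] at h
  calc (PySem.List.pyRange 0 N 1).map (fun i => f (PySem.List.pyGetD A i 0))
      = (PySem.List.pyRange 0 N 1).map (fun i => f (PySem.List.pyGetD (A.take N.toNat) i 0)) := by
        apply List.map_congr_left
        intro j hj
        obtain ⟨hj0, hjN⟩ := (PySem.List.mem_pyRange_one).mp hj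
        have hjlen : j < (A.length : Int) := lt_of_lt_of_le hjN hle
        rw [PySem.List.pyGetD_eq_getElem A 0 hj0 hjlen,
            PySem.List.pyGetD_eq_getElem (A.take N.toNat) 0 hj0 (by
              rw [List.length_take]; omega)]
        congr 1
        exact List.getElem_take.symm
    _ = ((PySem.List.pyRange 0 N 1).map (fun i => PySem.List.pyGetD (A.take N.toNat) i 0)).map f := by
        rw [List.map_map]; rfl
    _ = (A.take N.toNat).map f := by rw [hA']
    _ = (A.map f).take N.toNat := List.map_take

theorem pv_turn_eq (c : Int) (x : Int) (xs : List Int)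
    (hc : c = ((PySem.List.max? (x :: xs) (fun y => y)).getD 0)) :
    pvTurn (x :: xs) = (x :: xs).map (fun a => c - a) := by
  simp only [pvTurn, hc]

-- running max of the (c - ·)-image is c minus the running min
theorem pv_foldl_max_sub (c : Int) : ∀ (xs : List Int) (x : Int),
    (xs.map (fun a => c - a)).foldl max (c - x) = c - xs.foldl min x := by
  intro xs
  induction xs with
  | nil => intro x; simp
  | cons a t ih =>
      intro x
      simp only [List.map_cons, List.foldl_cons]
      rw [show max (c - x) (c - a) = c - min x a by omega]
      exact ih (min x a)

theorem pv_max_of_sub_map (c : Int) (x : Int) (xs : List Int) :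
    ((PySem.List.max? ((x :: xs).map (fun a => c - a)) (fun y => y)).getD 0)
      = c - ((PySem.List.min? (x :: xs) (fun y => y)).getD 0) := by
  simp only [List.map_cons, PySem.List.max?_id_cons, PySem.List.min?_id_cons, Option.getD_some]
  exact pv_foldl_max_sub c xs x

-- ===== VERDICT (by name: the statement is the Claim_ definition above) =====
theorem transform_array_after_k_turns_spec : Claim_equal_transform_array_after_k_turns := by
  intro N K A _hDom hPre
  unfold Spec_transform_array_after_k_turns transform_array_after_k_turns transform_array_after_k_turns_alt
  by_cases hK : K == 0
  · simp [hK]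
  · obtain ⟨hA, hle'⟩ := hPre (by simpa using hK)
    obtain ⟨x, xs, rfl⟩ := List.exists_cons_of_ne_nil hA
    have h0 : (0:Int) ≤ max N 0 := le_max_right N 0
    have hle : max N 0 ≤ ((x :: xs).length : Int) := by
      have : (0:Int) ≤ ((x :: xs).length : Int) := by positivity
      omega
    have hR : PySem.List.pyRange 0 N 1 = PySem.List.pyRange 0 (max N 0) 1 := by
      by_cases h : (0:Int) ≤ N
      · rw [max_eq_left h]
      · rw [PySem.List.pyRange_one_eq_nil (by omega), PySem.List.pyRange_one_eq_nil (by omega)]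

    rw [hR]
    by_cases hodd : PySem.Int.mod K 2 == 1
    · -- odd K: one turn
      simp only [hK, hodd, if_false, if_true, Bool.false_eq_true, List.range_one,
        List.foldl_cons, List.foldl_nil]
      rw [PySem.List.slice_to _ h0, pv_turn_eq _ x xs rfl,
        pv_map_idx (fun a => ((PySem.List.max? (x :: xs) (fun y => y)).getD 0) - a) (x :: xs) (max N 0) h0 hle]
    · -- even K: two turns
      simp only [hK, hodd, if_false, Bool.false_eq_true, List.range_succ, List.range_zero,
        List.foldl_cons, List.foldl_nil, List.foldl_append]
      rw [PySem.List.slice_to _ h0,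
        pv_map_idx (fun a => -((PySem.List.min? (x :: xs) (fun y => y)).getD 0) + a) (x :: xs) (max N 0) h0 hle,
        pv_turn_eq _ x xs rfl]
      set M := ((PySem.List.max? (x :: xs) (fun y => y)).getD 0) with hM
      have h2 : pvTurn ((x :: xs).map (fun a => M - a))
          = ((x :: xs).map (fun a => M - a)).map
              (fun a => (M - ((PySem.List.min? (x :: xs) (fun y => y)).getD 0)) - a) := by
        simp only [pvTurn, pv_max_of_sub_map]
      rw [h2, List.map_map]
      congr 1
      apply List.map_congr_left
      intro a _
      simp only [Function.comp_apply]
      ring
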